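-- pv_equiv track=rewrite | github.com/volcengine/verl | atropos/environments/intern_bootcamp/internbootcamp_lib/internbootcamp/libs/bbeh_multistep_arithmetic/bbeh_arithmetic_validor.py | _extract_operators
-- ===== SOURCE A (Python) =====
-- def _extract_operators(expression: str) -> set:
--     """提取表达式中的运算符"""
--     operators = set()
--     operator_chars = {'+', '-', '*', '/', '><', ';', '@', '<>', '[]', '#', '!', '~', '&', ':', ']['}
--
--     i = 0
--     while i < len(expression):
--         # 检查两字符运算符
--         if i + 1 < len(expression):
--             two_char = expression[i:i + 2]
--             if two_char in operator_chars:
--                 operators.add(two_char)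
--                 i += 2
--                 continue
--
--         # 检查单字符运算符
--         if expression[i] in operator_chars:
--             operators.add(expression[i])
--
--         i += 1
--
--     return operators
-- ===== SOURCE B (Python) =====
-- import re
--
-- _OP_RE = re.compile(r'><|<>|\[\]|\]\[|[+\-*/;@#!~&:]')
--
-- def _extract_operators(expression: str) -> set:
--     """提取表达式中的运算符"""
--     return set(_OP_RE.findall(expression))
-- ===== Notes on version B (the rewrite author's own statement) =====
-- stated objective: idiomatic
-- what changed: The explicit while-loop index state machine with in-loop length checks and incremental set.add is replaced by a single compiled regex (two-char alternatives before a single-char class) whose findall match list is turned into a set.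
import Mathlib
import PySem

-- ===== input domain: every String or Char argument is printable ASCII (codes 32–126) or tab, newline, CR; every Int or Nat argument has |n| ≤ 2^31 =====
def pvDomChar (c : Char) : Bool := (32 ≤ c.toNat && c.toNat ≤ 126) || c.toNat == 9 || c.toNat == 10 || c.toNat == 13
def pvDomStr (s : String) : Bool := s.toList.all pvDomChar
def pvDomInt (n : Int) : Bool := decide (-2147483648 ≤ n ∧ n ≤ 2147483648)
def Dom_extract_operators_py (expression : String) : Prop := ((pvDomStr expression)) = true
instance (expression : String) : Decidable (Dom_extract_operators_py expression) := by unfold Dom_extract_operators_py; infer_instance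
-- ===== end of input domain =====

-- B replaces A's explicit index/while-loop state machine by a regex-style greedy tokenizer
-- (two-char alternatives tried first) whose match list is collected into a set; objective: idiomatic.


-- ===== PORT A =====
-- operator_chars = {'+','-','*','/','><',';','@','<>','[]','#','!','~','&',':',']['}
def pvOpCharsA : PySem.Set String :=
  PySem.Set.ofList ["+", "-", "*", "/", "><", ";", "@", "<>", "[]", "#", "!", "~", "&", ":", "]["]

-- A's while loop: index i over the characters, accumulating the set 'operators'
def pvLoopA (cs : List Char) (i : Nat) (ops : PySem.Set String) : PySem.Set String :=
  if h : i < cs.length then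
    if h2 : i + 1 < cs.length then
      -- two_char = expression[i:i+2]
      let two := String.ofList (PySem.List.slice cs (some (i : Int)) (some ((i + 2 : Nat) : Int)))
      if PySem.Set.contains pvOpCharsA two then
        pvLoopA cs (i + 2) (PySem.Set.add ops two)
      else
        let one := String.ofList [cs[i]]
        pvLoopA cs (i + 1) (if PySem.Set.contains pvOpCharsA one then PySem.Set.add ops one else ops)
    else
      let one := String.ofList [cs[i]]
      pvLoopA cs (i + 1) (if PySem.Set.contains pvOpCharsA one then PySem.Set.add ops one else ops)
  else ops
termination_by cs.length - i

def extract_operators_py (expression : String) : List String :=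
  pvLoopA expression.toList 0 PySem.Set.empty

-- ===== PORT B =====
-- the compiled pattern r'><|<>|\[\]|\]\[|[+\-*/;@#!~&:]': two-char alternatives, then a single-char class
def pvTwoOps : List String := ["><", "<>", "[]", "]["]
def pvOneOps : List Char := ['+', '-', '*', '/', ';', '@', '#', '!', '~', '&', ':']

-- re.findall: greedy non-overlapping left-to-right scan, two-char alternatives tried first
def pvTokens : List Char → List String
  | a :: b :: rest =>
    if String.ofList [a, b] ∈ pvTwoOps then String.ofList [a, b] :: pvTokens rest
    else if a ∈ pvOneOps then String.ofList [a] :: pvTokens (b :: rest)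
    else pvTokens (b :: rest)
  | [a] => if a ∈ pvOneOps then [String.ofList [a]] else []
  | [] => []

def extract_operators_py_alt (expression : String) : List String :=
  PySem.Set.ofList (pvTokens expression.toList)

-- ===== PRECONDITION & SPEC =====
def Spec_extract_operators_py (expression : String) (out : List String) : Prop := out = extract_operators_py_alt expression
instance (expression : String) (out : List String) : Decidable (Spec_extract_operators_py expression out) := by unfold Spec_extract_operators_py; infer_instance

-- ===== CLAIM (what is proved, stated in full; the proofs are below) =====
def Claim_equal_extract_operators_py : Prop := ∀ (expression : String), Dom_extract_operators_py expression → Spec_extract_operators_py expression (extract_operators_py expression)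

-- ===== LEMMAS AND PROOFS =====

lemma ofList_eq_lit (l : List Char) (s : String) : (String.ofList l = s) ↔ l = s.toList := by
  rw [← String.toList_inj]; simp
lemma pvTwoMem (a b : Char) :
    PySem.Set.contains pvOpCharsA (String.ofList [a, b]) = decide (String.ofList [a, b] ∈ pvTwoOps) := by
  simp [pvOpCharsA, pvTwoOps, PySem.Set.contains, PySem.Set.ofList, ofList_eq_lit]
lemma pvOneMem (a : Char) :
    PySem.Set.contains pvOpCharsA (String.ofList [a]) = decide (a ∈ pvOneOps) := by
  simp [pvOpCharsA, pvOneOps, PySem.Set.contains, PySem.Set.ofList, ofList_eq_lit]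

lemma drop_two (cs : List Char) (i : Nat) (h2 : i + 1 < cs.length) :
    List.drop i cs = cs[i] :: cs[i+1] :: List.drop (i+2) cs := by
  rw [List.drop_eq_getElem_cons (show i < cs.length by omega),
      List.drop_eq_getElem_cons h2]

lemma slice_two (cs : List Char) (i : Nat) (h2 : i + 1 < cs.length) :
    PySem.List.slice cs (some (i : Int)) (some ((i + 2 : Nat) : Int)) = [cs[i], cs[i+1]] := by
  have h := PySem.List.slice_natCast_add (xs := cs) (j := i) (n := 2)
  rw [show ((i + 2 : Nat) : Int) = (i : Int) + ((2:Nat) : Int) by push_cast; ring, h]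
  rw [drop_two cs i h2]
  rfl

lemma loop_eq (cs : List Char) (i : Nat) (ops : PySem.Set String) :
    pvLoopA cs i ops = PySem.Set.update ops (pvTokens (cs.drop i)) := by
  fun_induction pvLoopA with
  | case1 i ops h h2 two hc ih =>
    have htwo : two = String.ofList [cs[i], cs[i+1]] := by
      rw [show two = String.ofList (PySem.List.slice cs (some (i : Int)) (some ((i + 2 : Nat) : Int))) from rfl,
          slice_two _ _ h2]
    rw [drop_two _ _ h2]
    simp only [pvTokens]
    rw [htwo] at hc ih ⊢
    rw [pvTwoMem, decide_eq_true_eq] at hc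
    rw [if_pos hc, ih]
    simp [PySem.Set.update]
  | case2 i ops h h2 two hc one ih =>
    have htwo : two = String.ofList [cs[i], cs[i+1]] := by
      rw [show two = String.ofList (PySem.List.slice cs (some (i : Int)) (some ((i + 2 : Nat) : Int))) from rfl,
          slice_two _ _ h2]
    rw [drop_two _ _ h2]
    simp only [pvTokens]
    rw [htwo] at hc
    rw [pvTwoMem] at hc
    simp only [decide_eq_true_eq] at hc
    rw [if_neg hc]
    have hdrop1 : List.drop (i+1) cs = cs[i+1] :: List.drop (i+2) cs := List.drop_eq_getElem_cons h2
    rw [hdrop1] at ih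
    by_cases hm : cs[i] ∈ pvOneOps
    · have hce : pvOpCharsA.contains one = true := by
        rw [show one = String.ofList [cs[i]] from rfl, pvOneMem]; simpa
      simp only [hce, dite_true, ite_true] at ih ⊢
      rw [if_pos hm, ih]
      simp [show one = String.ofList [cs[i]] from rfl, PySem.Set.update]
    · have hce : ¬ pvOpCharsA.contains one = true := by
        rw [show one = String.ofList [cs[i]] from rfl, pvOneMem]; simpa
      simp only [hce, Bool.false_eq_true, dite_false, ite_false] at ih ⊢
      rw [if_neg hm, ih]
  | case3 i ops h h2 one ih =>
    have hlast : i + 1 = cs.length := by omega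
    have hdrop : List.drop i cs = [cs[i]] := by
      rw [List.drop_eq_getElem_cons h]
      simp [List.drop_eq_nil_iff.mpr (by omega : cs.length ≤ i + 1)]
    have hdrop1 : List.drop (i+1) cs = [] := List.drop_eq_nil_iff.mpr (by omega)
    rw [hdrop1] at ih
    rw [hdrop]
    simp only [pvTokens]
    by_cases hm : cs[i] ∈ pvOneOps
    · have hce : pvOpCharsA.contains one = true := by
        rw [show one = String.ofList [cs[i]] from rfl, pvOneMem]; simpa
      simp only [hce, dite_true, ite_true] at ih ⊢
      rw [if_pos hm, ih]
      simp [show one = String.ofList [cs[i]] from rfl, PySem.Set.update, pvTokens]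
    · have hce : ¬ pvOpCharsA.contains one = true := by
        rw [show one = String.ofList [cs[i]] from rfl, pvOneMem]; simpa
      simp only [hce, Bool.false_eq_true, dite_false, ite_false] at ih ⊢
      rw [if_neg hm, ih]
      simp [pvTokens, PySem.Set.update]
  | case4 i ops h =>
    simp [List.drop_eq_nil_iff.mpr (by omega : cs.length ≤ i), pvTokens, PySem.Set.update]

-- ===== VERDICT (by name: the statement is the Claim_ definition above) =====
theorem extract_operators_py_spec : Claim_equal_extract_operators_py := by
  intro expression _
  unfold Spec_extract_operators_py extract_operators_py extract_operators_py_alt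
  rw [loop_eq]
  simp [PySem.Set.update, PySem.Set.ofList, PySem.Set.empty]
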